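-- pv_equiv track=rewrite | github.com/moltencrux/wordlesmash | rank_comb/main_functions.py | generate_multiset_raw
-- ===== SOURCE A (Python) =====
-- from math import comb, factorial, perm
--
-- def generate_combination_raw(n, k, rank):
--     """assumes that items are integners 0..something"""
--     combination = []
--     index = 0
--
--     while k > 0 and index < n:
--         remaining = n - index - 1
--         count = comb(remaining, k - 1)
--
--         if rank < count:
--             combination.append(index)
--             k -= 1
--         else:
--             rank -= count
--
--         index += 1
--
--     return tuple(combination)
--
-- def generate_multiset_raw(n, k, rank):
--     combo = []
--
--     offset = 0
--     multiset_combo = generate_combination_raw(n + k - 1, k, rank)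
--
--     for v in multiset_combo:
--         combo.append(v - offset)
--         offset += 1
--
--     return tuple(combo)
-- ===== SOURCE B (Python) =====
-- from math import comb
--
-- def generate_multiset_raw(n, k, rank):
--     # Combinatorial-number-system unranking: locate each of the k selected slots
--     # by galloping + binary search on cumulative binomial counts (hockey-stick
--     # identity), carrying the remaining count `target` via Pascal's rule instead
--     # of re-ranking slot by slot.
--     m = n + k - 1
--     if k <= 0 or m <= 0:
--         return ()
--     combo = []
--     rem = k
--     lo = 0
--     target = comb(m, k) - rank
--     while rem > 0 and lo < m and target > 0:
--         q = comb(m - lo - 1, rem)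
--         if q < target:
--             d = lo
--         else:
--             # gallop: bracket the first slot whose tail count drops below target
--             low, step, hi = lo, 1, lo + 1
--             qhi = comb(m - hi - 1, rem)
--             while hi < m - 1 and qhi >= target:
--                 low = hi
--                 step *= 2
--                 hi = min(m - 1, hi + step)
--                 qhi = comb(m - hi - 1, rem)
--             # binary search in (low, hi]
--             low += 1
--             while low < hi:
--                 mid = (low + hi) // 2
--                 qm = comb(m - mid - 1, rem)
--                 if qm < target:
--                     hi = mid
--                     qhi = qm
--                 else:
--                     low = mid + 1
--             d = hi
--             q = qhi
--         combo.append(d - (k - rem))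
--         target -= q          # Pascal: C(m-d-1, rem-1) - (C(m-d, rem) - target)
--         rem -= 1
--         lo = d + 1
--     return tuple(combo)
-- ===== Notes on version B (the rewrite author's own statement) =====
-- stated objective: alternative
-- what changed: B unranks in the combinatorial number system: it locates each of the k selected slots by galloping plus binary search on cumulative binomial counts (hockey-stick identity), carrying the remaining count via Pascal's rule, instead of A's linear scan over all n+k-1 slots; it trades A's one comb() per slot for O(log gap) comb() probes per selected element (fewer comb calls when k << n, comparable cost when k is close to n).
import Mathlib
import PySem

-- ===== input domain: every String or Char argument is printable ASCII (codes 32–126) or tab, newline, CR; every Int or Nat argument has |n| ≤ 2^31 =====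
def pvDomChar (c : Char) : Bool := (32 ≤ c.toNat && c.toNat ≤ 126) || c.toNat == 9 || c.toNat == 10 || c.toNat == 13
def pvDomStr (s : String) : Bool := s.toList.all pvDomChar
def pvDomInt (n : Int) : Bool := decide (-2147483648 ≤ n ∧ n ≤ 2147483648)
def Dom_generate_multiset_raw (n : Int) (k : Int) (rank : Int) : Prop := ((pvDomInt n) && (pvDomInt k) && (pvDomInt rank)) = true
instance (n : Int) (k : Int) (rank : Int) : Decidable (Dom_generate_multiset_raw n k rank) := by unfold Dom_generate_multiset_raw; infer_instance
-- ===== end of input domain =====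

-- B unranks in the combinatorial number system, locating each of the k selected
-- slots by galloping plus binary search on cumulative binomial counts and carrying
-- the remaining count via Pascal's rule, instead of A's linear scan over all
-- n+k-1 slots (objective: alternative; fewer comb calls when k << n, comparable
-- cost when k is close to n). Loops carry a Nat fuel parameter that only makes
-- the recursion structural; the fuel always suffices.

-- math.comb: both programs only call it with nonnegative arguments (the loop
-- guards ensure this), where Nat.choose over toNat is exact. Computed by the
-- multiplicative formula (with the C(n,k)=C(n,n-k) symmetry) so the ports
-- evaluate quickly; pyComb_eq below proves it IS Nat.choose over toNat.
def pyCombGo (n : Nat) : Nat → Nat → Nat → Nat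
  | 0, _, acc => acc
  | steps + 1, i, acc => pyCombGo n steps (i + 1) (acc * (n - i) / (i + 1))

def pyComb (a b : Int) : Int :=
  let n := a.toNat
  let k := b.toNat
  if k ≤ n then (pyCombGo n (min k (n - k)) 0 1 : Int) else 0

-- ===== PORT A =====
-- the while loop of generate_combination_raw; index advances by 1 per iteration,
-- so fuel n.toNat (consumed once per iteration) never runs out before the guard fails
def gcrLoop : Nat → Int → Int → Int → Int → List Int → List Int
  | 0, _, _, _, _, combination => combination
  | fuel + 1, n, k, rank, index, combination =>
    if 0 < k ∧ index < n then
      let remaining := n - index - 1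
      let count := pyComb remaining (k - 1)
      if rank < count then
        gcrLoop fuel n (k - 1) rank (index + 1) (combination ++ [index])
      else
        gcrLoop fuel n k (rank - count) (index + 1) combination
    else combination

def generate_combination_raw (n : Int) (k : Int) (rank : Int) : List Int :=
  gcrLoop n.toNat n k rank 0 []

def generate_multiset_raw (n : Int) (k : Int) (rank : Int) : List Int :=
  let multiset_combo := generate_combination_raw (n + k - 1) k rank
  (multiset_combo.foldl (fun (st : List Int × Int) v => (st.1 ++ [v - st.2], st.2 + 1)) ([], 0)).1

-- ===== PORT B =====
-- Source B's galloping loop; hi strictly increases every iteration, so fuel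
-- m.toNat suffices; qhi is the cached probe value comb(m-hi-1, rem)
def galLoop : Nat → Int → Int → Int → Int → Int → Int → Int → Int × Int × Int
  | 0, _, _, _, low, _, hi, qhi => (low, hi, qhi)
  | fuel + 1, m, rem, target, low, step, hi, qhi =>
    if hi < m - 1 ∧ target ≤ qhi then
      let hi' := min (m - 1) (hi + step * 2)
      galLoop fuel m rem target hi (step * 2) hi' (pyComb (m - hi' - 1) rem)
    else (low, hi, qhi)

-- Source B's inner binary search; the interval [low, hi] shrinks every iteration,
-- so fuel m.toNat suffices; returns (d, q) = (final hi, its cached probe)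
def bsLoop : Nat → Int → Int → Int → Int → Int → Int → Int × Int
  | 0, _, _, _, _, hi, qhi => (hi, qhi)
  | fuel + 1, m, rem, target, low, hi, qhi =>
    if low < hi then
      let mid := PySem.Int.floordiv (low + hi) 2
      let qm := pyComb (m - mid - 1) rem
      if qm < target then
        bsLoop fuel m rem target low mid qm
      else
        bsLoop fuel m rem target (mid + 1) hi qhi
    else (hi, qhi)

-- Source B's outer while loop; rem decreases by 1 per iteration, so fuel k.toNat suffices
def altLoop : Nat → Int → Int → Int → Int → Int → List Int → List Int
  | 0, _, _, _, _, _, combo => combo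
  | fuel + 1, m, k, rem, target, lo, combo =>
    if 0 < rem ∧ lo < m ∧ 0 < target then
      let q0 := pyComb (m - lo - 1) rem
      let dq :=
        if q0 < target then (lo, q0)
        else
          let p := galLoop m.toNat m rem target lo 1 (lo + 1) (pyComb (m - (lo + 1) - 1) rem)
          bsLoop m.toNat m rem target (p.1 + 1) p.2.1 p.2.2
      altLoop fuel m k (rem - 1) (target - dq.2) (dq.1 + 1)
        (combo ++ [dq.1 - (k - rem)])
    else combo

def generate_multiset_raw_alt (n : Int) (k : Int) (rank : Int) : List Int :=
  let m := n + k - 1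
  if k ≤ 0 ∨ m ≤ 0 then []
  else altLoop k.toNat m k k (pyComb m k - rank) 0 []

-- ===== PRECONDITION & SPEC =====
def Spec_generate_multiset_raw (n : Int) (k : Int) (rank : Int) (out : List Int) : Prop := out = generate_multiset_raw_alt n k rank
instance (n : Int) (k : Int) (rank : Int) (out : List Int) : Decidable (Spec_generate_multiset_raw n k rank out) := by unfold Spec_generate_multiset_raw; infer_instance

-- ===== CLAIM (what is proved, stated in full; the proofs are below) =====
def Claim_equal_generate_multiset_raw : Prop := ∀ (n : Int) (k : Int) (rank : Int), Dom_generate_multiset_raw n k rank → Spec_generate_multiset_raw n k rank (generate_multiset_raw n k rank)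

-- ===== LEMMAS AND PROOFS =====

-- reference form of A's scan, by well-founded recursion on the remaining slots
def specLoop (m rem r lo : Int) : List Int :=
  if h : 0 < rem ∧ lo < m then
    if r < pyComb (m - lo - 1) (rem - 1) then
      lo :: specLoop m (rem - 1) r (lo + 1)
    else
      specLoop m rem (r - pyComb (m - lo - 1) (rem - 1)) (lo + 1)
  else []
termination_by (m - lo).toNat
decreasing_by all_goals (have := h.2; omega)

theorem pyCombGo_spec (n : Nat) : ∀ (steps i : Nat),
    pyCombGo n steps i (n.choose i) = n.choose (i + steps) := by
  intro steps
  induction steps with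
  | zero => intro i; simp [pyCombGo]
  | succ s ih =>
    intro i
    have hd : n.choose i * (n - i) / (i + 1) = n.choose (i + 1) := by
      rw [← Nat.choose_succ_right_eq n i]
      exact Nat.mul_div_cancel _ (by omega)
    calc pyCombGo n (s + 1) i (n.choose i)
        = pyCombGo n s (i + 1) (n.choose i * (n - i) / (i + 1)) := rfl
      _ = pyCombGo n s (i + 1) (n.choose (i + 1)) := by rw [hd]
      _ = n.choose (i + 1 + s) := ih (i + 1)
      _ = n.choose (i + (s + 1)) := by ring_nf

theorem pyComb_eq (a b : Int) : pyComb a b = ((a.toNat.choose b.toNat : Nat) : Int) := by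
  unfold pyComb
  by_cases h : b.toNat ≤ a.toNat
  · rw [if_pos h]
    have h0 := pyCombGo_spec a.toNat (min b.toNat (a.toNat - b.toNat)) 0
    rw [Nat.choose_zero_right] at h0
    rw [h0]
    rcases min_cases b.toNat (a.toNat - b.toNat) with ⟨hm, _⟩ | ⟨hm, _⟩ <;> rw [hm]
    · simp
    · rw [Nat.zero_add, Nat.choose_symm h]
  · rw [if_neg h, Nat.choose_eq_zero_of_lt (by omega)]
    rfl

theorem pyComb_nonneg (a b : Int) : 0 ≤ pyComb a b := by
  rw [pyComb_eq]; exact Int.natCast_nonneg _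

theorem pyComb_pascal (a b : Int) (ha : 0 < a) (hb : 0 < b) :
    pyComb a b = pyComb (a - 1) (b - 1) + pyComb (a - 1) b := by
  rw [pyComb_eq, pyComb_eq, pyComb_eq]
  rw [show a.toNat = (a - 1).toNat + 1 by omega, show b.toNat = (b - 1).toNat + 1 by omega,
      Nat.choose_succ_succ]
  push_cast; ring

theorem pyComb_zero (b : Int) (hb : 0 < b) : pyComb 0 b = 0 := by
  rw [pyComb_eq, Nat.choose_eq_zero_of_lt (by omega)]
  rfl

theorem pyComb_mono (a a' b : Int) (h : a ≤ a') : pyComb a b ≤ pyComb a' b := by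
  rw [pyComb_eq, pyComb_eq]
  exact_mod_cast Nat.choose_le_choose b.toNat (by omega : a.toNat ≤ a'.toNat)

-- A's fueled loop computes specLoop whenever the fuel covers the remaining slots
theorem gcrLoop_spec (f : Nat) (m : Int) : ∀ (rem r lo : Int) (acc : List Int),
    (m - lo).toNat ≤ f → gcrLoop f m rem r lo acc = acc ++ specLoop m rem r lo := by
  induction f with
  | zero =>
    intro rem r lo acc hf
    rw [specLoop]
    rw [dif_neg (by omega)]
    simp [gcrLoop]
  | succ f ih =>
    intro rem r lo acc hf
    rw [specLoop]
    by_cases h : 0 < rem ∧ lo < m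
    · rw [dif_pos h]
      simp only [gcrLoop, if_pos h]
      split_ifs with hr
      · rw [ih (rem - 1) r (lo + 1) (acc ++ [lo]) (by omega)]
        simp
      · exact ih rem (r - pyComb (m - lo - 1) (rem - 1)) (lo + 1) acc (by omega)
    · rw [dif_neg h]
      simp [gcrLoop, h]

-- when the rank is at least the number of remaining combinations, the scan
-- skips everything and selects nothing
theorem specLoop_empty (m : Int) : ∀ (rem r lo : Int),
    pyComb (m - lo) rem ≤ r → specLoop m rem r lo = [] := by
  intro rem r lo
  induction rem, r, lo using specLoop.induct m with
  | case1 rem r lo h hr ih =>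
    intro hge
    have hp := pyComb_pascal (m - lo) rem (by omega) h.1
    have := pyComb_nonneg (m - lo - 1) rem
    omega
  | case2 rem r lo h hr ih =>
    intro hge
    rw [specLoop, dif_pos h, if_neg hr]
    apply ih
    have hp := pyComb_pascal (m - lo) rem (by omega) h.1
    have he : m - lo - 1 = m - (lo + 1) := by ring
    rw [← he]; omega
  | case3 rem r lo h =>
    intro _
    rw [specLoop, dif_neg h]

-- hockey stick: as long as every slot j in [lo, d) fails the target test,
-- the scan skips from lo straight to d, the rank falling by a telescoping sum
theorem specLoop_skipTo (m rem target : Int) (hrem : 0 < rem) :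
    ∀ (c : Nat) (lo : Int), (m - 1 - lo).toNat ≤ c → ∀ (d : Int), lo ≤ d → d < m →
    (∀ j, lo ≤ j → j < d → target ≤ pyComb (m - j - 1) rem) →
    specLoop m rem (pyComb (m - lo) rem - target) lo
      = specLoop m rem (pyComb (m - d) rem - target) d := by
  intro c
  induction c with
  | zero =>
    intro lo hc d hld hdm _
    have : lo = d := by omega
    rw [this]
  | succ c ih =>
    intro lo hc d hld hdm hno
    rcases eq_or_lt_of_le hld with heq | hlt
    · rw [heq]
    · have hlom : lo < m := by omega
      have hnoQ : target ≤ pyComb (m - lo - 1) rem := hno lo le_rfl hlt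
      have hp := pyComb_pascal (m - lo) rem (by omega) hrem
      rw [specLoop, dif_pos ⟨hrem, hlom⟩, if_neg (by omega)]
      have he1 : pyComb (m - lo) rem - target - pyComb (m - lo - 1) (rem - 1)
          = pyComb (m - (lo + 1)) rem - target := by
        have : m - (lo + 1) = m - lo - 1 := by ring
        rw [this]; omega
      rw [he1]
      exact ih (lo + 1) (by omega) d (by omega) hdm
        (fun j h1 h2 => hno j (by omega) h2)

-- the offset subtraction A's second pass performs, as a function of the
-- position j of the first element
def offMap (j : Int) : List Int → List Int
  | [] => []
  | v :: t => (v - j) :: offMap (j + 1) t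

theorem fold_off (l : List Int) (combo : List Int) (j : Int) :
    (l.foldl (fun (st : List Int × Int) v => (st.1 ++ [v - st.2], st.2 + 1)) (combo, j)).1
      = combo ++ offMap j l := by
  induction l generalizing combo j with
  | nil => simp [offMap]
  | cons v t ih => simp [List.foldl, offMap, ih]

-- binary-search correctness: the result (d, q) has low ≤ d ≤ hi, q its cached
-- probe value, q below target, and no slot in [low, d) below target
theorem bsLoop_spec (m rem target : Int) :
    ∀ (f : Nat) (low hi qhi : Int), (hi - low).toNat ≤ f → low ≤ hi →
    qhi = pyComb (m - hi - 1) rem → qhi < target →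
    let p := bsLoop f m rem target low hi qhi
    low ≤ p.1 ∧ p.1 ≤ hi ∧ p.2 = pyComb (m - p.1 - 1) rem ∧ p.2 < target ∧
      (∀ j, low ≤ j → j < p.1 → target ≤ pyComb (m - j - 1) rem) := by
  intro f
  induction f with
  | zero =>
    intro low hi qhi hf hlh hq hqt
    have : low = hi := by omega
    subst this
    exact ⟨le_rfl, le_rfl, hq, hqt, fun j h1 h2 => by simp [bsLoop] at h2; omega⟩
  | succ f ih =>
    intro low hi qhi hf hlh hq hqt
    by_cases h : low < hi
    · have hmid := PySem.Int.floordiv_two_mid_bounds (le_of_lt h)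
      have hmlt : PySem.Int.floordiv (low + hi) 2 < hi := by
        rw [PySem.Int.floordiv_lt_iff_lt_mul (by omega)]; omega
      simp only [bsLoop, if_pos h]
      set mid := PySem.Int.floordiv (low + hi) 2 with hmiddef
      by_cases hqm : pyComb (m - mid - 1) rem < target
      · rw [if_pos hqm]
        have := ih low mid (pyComb (m - mid - 1) rem) (by omega) (by omega) rfl hqm
        exact ⟨this.1, by omega, this.2.2.1, this.2.2.2.1, this.2.2.2.2⟩
      · rw [if_neg hqm]
        have := ih (mid + 1) hi qhi (by omega) (by omega) hq hqt
        refine ⟨by omega, this.2.1, this.2.2.1, this.2.2.2.1, ?_⟩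
        intro j h1 h2
        by_cases hj : j ≤ mid
        · exact le_trans (le_of_not_gt hqm) (pyComb_mono _ _ rem (by omega))
        · exact this.2.2.2.2 j (by omega) h2
    · have : low = hi := by omega
      subst this
      simp only [bsLoop, if_neg h]
      exact ⟨le_rfl, le_rfl, hq, hqt, fun j h1 h2 => by omega⟩

-- galloping correctness: the returned bracket (l, h, qh) has every slot up to l
-- failing the target test, h satisfying it, and qh its cached probe value
theorem galLoop_spec (m rem target : Int) (hrem : 0 < rem) (htgt : 0 < target) :
    ∀ (f : Nat) (low step hi qhi : Int), (m - 1 - hi).toNat ≤ f → 0 < step →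
    low < hi → hi ≤ m - 1 → target ≤ pyComb (m - low - 1) rem →
    qhi = pyComb (m - hi - 1) rem →
    let p := galLoop f m rem target low step hi qhi
    low ≤ p.1 ∧ target ≤ pyComb (m - p.1 - 1) rem ∧ p.1 < p.2.1 ∧ p.2.1 ≤ m - 1 ∧
      p.2.2 = pyComb (m - p.2.1 - 1) rem ∧ p.2.2 < target := by
  intro f
  induction f with
  | zero =>
    intro low step hi qhi hf hstep hlh hhm hnq hq
    have hhi : hi = m - 1 := by omega
    have hq0 : qhi < target := by
      rw [hq, hhi, show m - (m - 1) - 1 = 0 by ring, pyComb_zero rem hrem]; omega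
    exact ⟨le_rfl, hnq, hlh, hhm, hq, hq0⟩
  | succ f ih =>
    intro low step hi qhi hf hstep hlh hhm hnq hq
    by_cases h : hi < m - 1 ∧ target ≤ qhi
    · simp only [galLoop, if_pos h]
      have hlt : hi < min (m - 1) (hi + step * 2) := by omega
      have := ih hi (step * 2) (min (m - 1) (hi + step * 2))
        (pyComb (m - min (m - 1) (hi + step * 2) - 1) rem) (by omega) (by omega)
        hlt (by omega) (hq ▸ h.2) rfl
      exact ⟨by omega, this.2.1, this.2.2.1, this.2.2.2.1, this.2.2.2.2⟩
    · simp only [galLoop, if_neg h]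
      have hq0 : qhi < target := by
        by_cases hh : hi < m - 1
        · omega
        · have hhi : hi = m - 1 := by omega
          rw [hq, hhi, show m - (m - 1) - 1 = 0 by ring, pyComb_zero rem hrem]; omega
      exact ⟨le_rfl, hnq, hlh, hhm, hq, hq0⟩

-- B's outer loop builds the offset-subtracted form of A's scan directly; target
-- stands for C(m-lo, rem) - r, r being A's running rank
theorem altLoop_spec (m k : Int) : ∀ (f : Nat) (rem target lo : Int) (combo : List Int),
    rem.toNat ≤ f → 0 ≤ lo → k - rem = (combo.length : Int) →
    altLoop f m k rem target lo combo
      = combo ++ offMap (combo.length : Int) (specLoop m rem (pyComb (m - lo) rem - target) lo) := by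
  intro f
  induction f with
  | zero =>
    intro rem target lo combo hf _ _
    rw [specLoop, dif_neg (by omega)]
    simp [altLoop, offMap]
  | succ f ih =>
    intro rem target lo combo hf hlo hkr
    by_cases h : 0 < rem ∧ lo < m
    · by_cases htp : 0 < target
      · simp only [altLoop, if_pos (show 0 < rem ∧ lo < m ∧ 0 < target from ⟨h.1, h.2, htp⟩)]
        -- the selected slot d and its cached probe value q
        set dq := (if pyComb (m - lo - 1) rem < target then (lo, pyComb (m - lo - 1) rem)
                   else
                     let p := galLoop m.toNat m rem target lo 1 (lo + 1) (pyComb (m - (lo + 1) - 1) rem)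
                     bsLoop m.toNat m rem target (p.1 + 1) p.2.1 p.2.2) with hdq
        have hbs : lo ≤ dq.1 ∧ dq.1 ≤ m - 1 ∧ dq.2 = pyComb (m - dq.1 - 1) rem ∧
            dq.2 < target ∧
            (∀ j, lo ≤ j → j < dq.1 → target ≤ pyComb (m - j - 1) rem) := by
          by_cases hQlo : pyComb (m - lo - 1) rem < target
          · rw [hdq, if_pos hQlo]
            refine ⟨le_rfl, ?_, rfl, hQlo, fun j h1 h2 => by omega⟩
            rcases lt_or_ge lo (m - 1) with h' | h'
            · omega
            · have he : lo = m - 1 := by omega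
              omega
          · have hlom1 : lo < m - 1 := by
              rcases lt_or_ge lo (m - 1) with h' | h'
              · exact h'
              · exfalso
                have he : lo = m - 1 := by omega
                rw [he, show m - (m - 1) - 1 = 0 by ring, pyComb_zero rem h.1] at hQlo
                omega
            have hgal := galLoop_spec m rem target h.1 htp m.toNat lo 1 (lo + 1)
              (pyComb (m - (lo + 1) - 1) rem) (by omega) (by omega) (by omega)
              (by omega) (le_of_not_gt hQlo) rfl
            set p := galLoop m.toNat m rem target lo 1 (lo + 1) (pyComb (m - (lo + 1) - 1) rem) with hp
            obtain ⟨hlp, hnql, hlh, hhm, hqh, hQh⟩ := hgal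
            have hbs2 := bsLoop_spec m rem target m.toNat (p.1 + 1) p.2.1 p.2.2
              (by omega) (by omega) hqh hQh
            have hde : dq = bsLoop m.toNat m rem target (p.1 + 1) p.2.1 p.2.2 := by
              rw [hdq, if_neg hQlo]
            rw [hde]
            refine ⟨by omega, by omega, hbs2.2.2.1, hbs2.2.2.2.1, ?_⟩
            intro j h1 h2
            by_cases hj : j ≤ p.1
            · exact le_trans hnql (pyComb_mono _ _ rem (by omega))
            · exact hbs2.2.2.2.2 j (by omega) h2
        obtain ⟨hld, hdm, hqval, hQd, hnoQ⟩ := hbs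
        have hQd' : pyComb (m - dq.1 - 1) rem < target := by rw [← hqval]; exact hQd
        -- A's scan skips straight to d …
        have hskip := specLoop_skipTo m rem target h.1
          (m - 1 - lo).toNat lo le_rfl dq.1 hld (by omega) hnoQ
        rw [hskip]
        -- … and selects d there
        have hpas := pyComb_pascal (m - dq.1) rem (by omega) h.1
        have hpas' : m - dq.1 - 1 = m - (dq.1 + 1) := by ring
        rw [specLoop, dif_pos ⟨h.1, by omega⟩, if_pos (by omega)]
        rw [ih (rem - 1) (target - dq.2) (dq.1 + 1)
              (combo ++ [dq.1 - (k - rem)]) (by omega) (by omega) (by simp; omega)]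
        have harg : pyComb (m - (dq.1 + 1)) (rem - 1) - (target - dq.2)
            = pyComb (m - dq.1) rem - target := by
          rw [← hpas', hqval]; omega
        rw [harg]
        simp [offMap, hkr]
      · -- target ≤ 0: B breaks, A's scan skips everything
        simp only [altLoop, if_neg (by omega : ¬(0 < rem ∧ lo < m ∧ 0 < target))]
        rw [specLoop_empty m rem (pyComb (m - lo) rem - target) lo (by omega)]
        simp [offMap]
    · rw [specLoop, dif_neg h]
      have h' : ¬(0 < rem ∧ lo < m ∧ 0 < target) := by tauto
      simp only [altLoop, if_neg h']
      simp [offMap]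

-- ===== VERDICT (by name: the statement is the Claim_ definition above) =====
theorem generate_multiset_raw_spec : Claim_equal_generate_multiset_raw := by
  intro n k rank _
  unfold Spec_generate_multiset_raw generate_multiset_raw generate_multiset_raw_alt
    generate_combination_raw
  rw [fold_off, gcrLoop_spec (n + k - 1).toNat (n + k - 1) k rank 0 [] (by omega)]
  by_cases hg : k ≤ 0 ∨ n + k - 1 ≤ 0
  · simp only [if_pos hg]
    rw [specLoop, dif_neg (by omega)]
    simp [offMap]
  · simp only [if_neg hg]
    rw [altLoop_spec (n + k - 1) k k.toNat k (pyComb (n + k - 1) k - rank) 0 []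
          (by omega) le_rfl (by simp)]
    have he : pyComb (n + k - 1 - 0) k - (pyComb (n + k - 1) k - rank) = rank := by
      rw [show n + k - 1 - 0 = n + k - 1 by ring]; ring
    rw [he]
    simp
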